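-- pv_equiv track=rewrite | github.com/Nokix/CodeChamps | excercises/deadfish.py | bfs
-- ===== SOURCE A (Python) =====
-- def get_options(a):
--     yield (a + 1) % 256, "i"
--     yield (a - 1) % 256, "d"
--     yield (a ** 2) % 256, "s"
--
-- def bfs(start, target):
--     queue = [(start % 256, target % 256, "")]
--     while queue:
--         current_start, target, output = queue.pop(0)
--         if current_start == target:
--             return output
--         for new_start, appendix in get_options(current_start):
--             queue.append((new_start, target, output + appendix))
-- ===== SOURCE B (Python) =====
-- def bfs(start, target):
--     # Level-by-level BFS with a visited set (mark on enqueue, keeping i/d/s order),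
--     # so at most 256 states are ever expanded.
--     start %= 256
--     target %= 256
--     visited = {start}
--     frontier = [(start, "")]
--     while True:
--         for a, out in frontier:
--             if a == target:
--                 return out
--         nxt = []
--         for a, out in frontier:
--             for n, ch in (((a + 1) % 256, "i"), ((a - 1) % 256, "d"), ((a * a) % 256, "s")):
--                 if n not in visited:
--                     visited.add(n)
--                     nxt.append((n, out + ch))
--         frontier = nxt
-- ===== Notes on version B (the rewrite author's own statement) =====
-- stated objective: alternative
-- what changed: Replaces A's unpruned FIFO queue (which re-expands every duplicate state, so the queue grows exponentially with the BFS depth) by level-by-level BFS over the 256 residues with a visited set marked on enqueue in i/d/s order, so at most 256 states are ever expanded.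
import Mathlib
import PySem

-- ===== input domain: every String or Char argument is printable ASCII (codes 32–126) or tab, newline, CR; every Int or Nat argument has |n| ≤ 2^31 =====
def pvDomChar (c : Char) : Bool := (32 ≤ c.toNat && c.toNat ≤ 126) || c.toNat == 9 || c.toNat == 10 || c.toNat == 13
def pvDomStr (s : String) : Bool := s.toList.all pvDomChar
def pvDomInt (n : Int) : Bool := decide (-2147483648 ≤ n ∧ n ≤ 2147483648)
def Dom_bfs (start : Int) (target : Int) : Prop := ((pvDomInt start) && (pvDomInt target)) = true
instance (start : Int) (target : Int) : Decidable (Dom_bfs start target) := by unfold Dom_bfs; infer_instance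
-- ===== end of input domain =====

-- B replaces A's unpruned FIFO queue (which re-expands duplicate states) by level-by-level
-- BFS over the 256 residues with a visited set marked on enqueue in i/d/s order, so at most
-- 256 states are ever expanded.

-- ===== PORT A =====
def getOptions (a : Int) : List (Int × String) :=
  [(PySem.Int.mod (a + 1) 256, "i"), (PySem.Int.mod (a - 1) 256, "d"), (PySem.Int.mod (a ^ 2) 256, "s")]

-- A's while-queue loop; the fuel argument only makes it total (a match is always dequeued
-- before the fuel runs out, and the queue never empties — proved below)
def bfsLoop : Nat → List (Int × Int × String) → String
  | 0, _ => ""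
  | _ + 1, [] => ""
  | fuel + 1, (c, t, out) :: rest =>
    if c = t then out
    else bfsLoop fuel (rest ++ (getOptions c).map (fun p => (p.1, t, out ++ p.2)))

def bfs (start : Int) (target : Int) : String :=
  bfsLoop (3 ^ 257) [(PySem.Int.mod start 256, PySem.Int.mod target 256, "")]

-- ===== PORT B =====
def neighbors (a : Int) : List (Int × String) :=
  [(PySem.Int.mod (a + 1) 256, "i"), (PySem.Int.mod (a - 1) 256, "d"), (PySem.Int.mod (a * a) 256, "s")]

-- B's while-True loop; fuel 257 only makes it total (a hit occurs within 256 levels — proved below)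
def levelLoop : Nat → Int → PySem.Set Int → List (Int × String) → String
  | 0, _, _, _ => ""
  | fuel + 1, target, visited, frontier =>
    match frontier.find? (fun p => p.1 == target) with
    | some p => p.2
    | none =>
      let st := frontier.foldl
        (fun (acc : PySem.Set Int × List (Int × String)) p =>
          (neighbors p.1).foldl
            (fun (acc2 : PySem.Set Int × List (Int × String)) q =>
              if PySem.Set.contains acc2.1 q.1 then acc2
              else (PySem.Set.add acc2.1 q.1, acc2.2 ++ [(q.1, p.2 ++ q.2)]))
            acc)
        (visited, [])
      levelLoop fuel target st.1 st.2

def bfs_alt (start : Int) (target : Int) : String :=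
  levelLoop 257 (PySem.Int.mod target 256)
    (PySem.Set.add PySem.Set.empty (PySem.Int.mod start 256))
    [(PySem.Int.mod start 256, "")]

-- ===== PRECONDITION & SPEC =====
def Spec_bfs (start : Int) (target : Int) (out : String) : Prop := out = bfs_alt start target
instance (start : Int) (target : Int) (out : String) : Decidable (Spec_bfs start target out) := by unfold Spec_bfs; infer_instance

-- ===== CLAIM (what is proved, stated in full; the proofs are below) =====
def Claim_equal_bfs : Prop := ∀ (start : Int) (target : Int), Dom_bfs start target → Spec_bfs start target (bfs start target)

-- ===== LEMMAS AND PROOFS =====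

-- children of a frontier element (shared spec-side notion; A's getOptions = B's neighbors)
def chl (p : Int × String) : List (Int × String) :=
  (neighbors p.1).map (fun q => (q.1, p.2 ++ q.2))

-- level-by-level search: the common reference both ports are reduced to
def levelSearch (t : Int) : Nat → List (Int × String) → String
  | 0, _ => ""
  | m + 1, fr =>
    match fr.find? (fun p => p.1 == t) with
    | some p => p.2
    | none => levelSearch t m (fr.flatMap chl)

def hitWithin (t : Int) : Nat → List (Int × String) → Prop
  | 0, _ => False
  | m + 1, fr => (∃ p ∈ fr, p.1 = t) ∨ hitWithin t m (fr.flatMap chl)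

-- ---- A side: the FIFO queue processes the tree level by level ----
def pairLoop (t : Int) : Nat → List (Int × String) → String
  | 0, _ => ""
  | _ + 1, [] => ""
  | fuel + 1, p :: rest => if p.1 = t then p.2 else pairLoop t fuel (rest ++ chl p)

theorem bfsLoop_eq_pairLoop (t : Int) :
    ∀ (fuel : Nat) (l : List (Int × String)),
      bfsLoop fuel (l.map (fun p => (p.1, t, p.2))) = pairLoop t fuel l := by
  intro fuel
  induction fuel with
  | zero => intro l; rfl
  | succ n ih =>
    intro l
    cases l with
    | nil => rfl
    | cons p rest =>
      simp only [List.map_cons, bfsLoop, pairLoop]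
      by_cases h : p.1 = t
      · simp [h]
      · simp only [h, if_false]
        rw [← ih (rest ++ chl p)]
        congr 1
        simp [chl, getOptions, neighbors, pow_two]

theorem pairLoop_level (t : Int) :
    ∀ (l acc : List (Int × String)) (fuel : Nat),
      pairLoop t (l.length + fuel) (l ++ acc) =
        match l.find? (fun p => p.1 == t) with
        | some p => p.2
        | none => pairLoop t fuel (acc ++ l.flatMap chl) := by
  intro l
  induction l with
  | nil => intro acc fuel; simp [List.find?]
  | cons p rest ih =>
    intro acc fuel
    simp only [List.length_cons, List.cons_append, List.find?]
    by_cases h : p.1 = t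
    · have : (p.1 == t) = true := by simp [h]
      rw [this]
      show pairLoop t (rest.length + 1 + fuel) (p :: (rest ++ acc)) = p.2
      have hf : rest.length + 1 + fuel = (rest.length + fuel) + 1 := by omega
      rw [hf]
      simp [pairLoop, h]
    · have hb : (p.1 == t) = false := by simp [h]
      rw [hb]
      have hf : rest.length + 1 + fuel = (rest.length + fuel) + 1 := by omega
      rw [hf]
      show pairLoop t ((rest.length + fuel) + 1) (p :: (rest ++ acc)) = _
      simp only [pairLoop, h, if_false]
      rw [show rest ++ acc ++ chl p = rest ++ (acc ++ chl p) by simp]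
      rw [ih (acc ++ chl p) fuel]
      simp [List.flatMap_cons, List.append_assoc]

-- exact number of dequeues A needs to finish m whole levels, per frontier element
def fuelFor : Nat → Nat
  | 0 => 0
  | m + 1 => 1 + 3 * fuelFor m

theorem length_flatMap_chl (fr : List (Int × String)) :
    (fr.flatMap chl).length = 3 * fr.length := by
  induction fr with
  | nil => rfl
  | cons p rest ih => simp [List.flatMap_cons, chl, neighbors, ih]; omega

theorem fuelFor_lt (m : Nat) : fuelFor m < 3 ^ m := by
  induction m with
  | zero => simp [fuelFor]
  | succ n ih => rw [pow_succ]; simp [fuelFor]; omega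

theorem pairLoop_eq_levelSearch (t : Int) :
    ∀ (m : Nat) (fr : List (Int × String)), hitWithin t m fr →
      ∀ (extra : Nat), pairLoop t (fr.length * fuelFor m + extra) fr = levelSearch t m fr := by
  intro m
  induction m with
  | zero => intro fr h; exact absurd h (by simp [hitWithin])
  | succ n ih =>
    intro fr h extra
    have harith : fr.length * fuelFor (n + 1) + extra
        = fr.length + ((fr.flatMap chl).length * fuelFor n + extra) := by
      rw [length_flatMap_chl]; simp [fuelFor]; ring
    have hstep := pairLoop_level t fr [] ((fr.flatMap chl).length * fuelFor n + extra)
    simp only [List.append_nil, List.nil_append] at hstep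
    rw [harith, hstep]
    cases hf : fr.find? (fun p => p.1 == t) with
    | some p => simp [levelSearch, hf]
    | none =>
      simp only [levelSearch, hf]
      apply ih
      cases h with
      | inl hex =>
        exfalso
        obtain ⟨p, hp, hpt⟩ := hex
        have := List.find?_eq_none.mp hf p hp
        simp [hpt] at this
      | inr h' => exact h'

-- ---- B side: filter-and-first-occurrence dedup is what one level of B keeps ----
def dedupF (vis : List Int) : List (Int × String) → List (Int × String)
  | [] => []
  | p :: l => if p.1 ∈ vis then dedupF vis l else p :: dedupF (vis ++ [p.1]) l

theorem set_add_of_not_mem (s : PySem.Set Int) (x : Int) (h : x ∉ s) :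
    PySem.Set.add s x = s ++ [x] := by
  simp [PySem.Set.add, PySem.Set.contains, h]

theorem find?_dedupF (t : Int) (l : List (Int × String)) :
    ∀ (vis : List Int), t ∉ vis →
      (dedupF vis l).find? (fun p => p.1 == t) = l.find? (fun p => p.1 == t) := by
  induction l with
  | nil => intro vis _; rfl
  | cons p rest ih =>
    intro vis hvis
    simp only [dedupF]
    by_cases hm : p.1 ∈ vis
    · have hne : (p.1 == t) = false := by
        simp only [beq_eq_false_iff_ne, ne_eq]; rintro rfl; exact hvis hm
      simp [hm, List.find?, hne, ih vis hvis]
    · by_cases hpt : p.1 = t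
      · subst hpt; simp [hm, List.find?]
      · have hne : (p.1 == t) = false := by simp [hpt]
        have ht' : t ∉ vis ++ [p.1] := by
          simp only [List.mem_append, List.mem_singleton]
          rintro (h | h)
          · exact hvis h
          · exact hpt h.symm
        simp [hm, List.find?, hne, ih (vis ++ [p.1]) ht']

theorem mem_dedupF (l : List (Int × String)) :
    ∀ (vis : List Int) (p : Int × String), p ∈ dedupF vis l → p ∈ l ∧ p.1 ∉ vis := by
  induction l with
  | nil => intro vis p h; simp [dedupF] at h
  | cons q rest ih =>
    intro vis p h
    simp only [dedupF] at h
    by_cases hm : q.1 ∈ vis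
    · rw [if_pos hm] at h
      obtain ⟨h1, h2⟩ := ih vis p h
      exact ⟨List.mem_cons_of_mem _ h1, h2⟩
    · rw [if_neg hm] at h
      rcases List.mem_cons.mp h with rfl | h'
      · exact ⟨List.mem_cons_self .., hm⟩
      · obtain ⟨h1, h2⟩ := ih _ p h'
        refine ⟨List.mem_cons_of_mem _ h1, fun hv => h2 ?_⟩
        simp [hv]

theorem keys_dedupF_complete (l : List (Int × String)) :
    ∀ (vis : List Int) (a : Int), a ∈ l.map Prod.fst →
      a ∈ vis ++ (dedupF vis l).map Prod.fst := by
  induction l with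
  | nil => intro vis a h; simp at h
  | cons q rest ih =>
    intro vis a h
    simp only [dedupF]
    by_cases hm : q.1 ∈ vis
    · rw [if_pos hm]
      rcases List.mem_map.mp h with ⟨p, hp, rfl⟩
      rcases List.mem_cons.mp hp with rfl | h'
      · simp [hm]
      · exact ih vis _ (List.mem_map_of_mem h')
    · rw [if_neg hm]
      rcases List.mem_map.mp h with ⟨p, hp, rfl⟩
      rcases List.mem_cons.mp hp with rfl | h'
      · simp
      · have := ih (vis ++ [q.1]) p.1 (List.mem_map_of_mem h')
        simp only [List.mem_append, List.mem_cons] at this ⊢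
        simp only [List.map_cons, List.mem_cons]
        tauto

theorem dedupF_skip (y : List (Int × String)) :
    ∀ (x : List (Int × String)) (vis : List Int), (∀ r ∈ x, r.1 ∈ vis) →
      dedupF vis (x ++ y) = dedupF vis y := by
  intro x
  induction x with
  | nil => intro vis _; rfl
  | cons q rest ih =>
    intro vis h
    simp only [List.cons_append, dedupF, if_pos (h q (List.mem_cons_self ..))]
    exact ih vis (fun r hr => h r (List.mem_cons_of_mem _ hr))

theorem dedupF_append (y : List (Int × String)) :
    ∀ (x : List (Int × String)) (vis : List Int),
      dedupF vis (x ++ y) = dedupF vis x ++ dedupF (vis ++ (dedupF vis x).map Prod.fst) y := by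
  intro x
  induction x with
  | nil => intro vis; simp [dedupF]
  | cons q rest ih =>
    intro vis
    simp only [List.cons_append, dedupF]
    by_cases hm : q.1 ∈ vis
    · rw [if_pos hm, if_pos hm, ih vis]
    · rw [if_neg hm, if_neg hm, ih (vis ++ [q.1])]
      simp [List.append_assoc]

theorem keys_chl (p : Int × String) : (chl p).map Prod.fst = (neighbors p.1).map Prod.fst := by
  simp [chl]

-- dropping already-visited or duplicate states does not change the pruned next level
theorem prune_flatMap :
    ∀ (fr : List (Int × String)) (W V : List Int),
      (∀ a ∈ W, ∀ r ∈ neighbors a, r.1 ∈ V) → W ⊆ V → (∀ p ∈ fr, p.1 ∈ V) →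
      dedupF V ((dedupF W fr).flatMap chl) = dedupF V (fr.flatMap chl) := by
  intro fr
  induction fr with
  | nil => intro W V _ _ _; rfl
  | cons p rest ih =>
    intro W V h1 h2 h3
    simp only [dedupF, List.flatMap_cons]
    by_cases hm : p.1 ∈ W
    · rw [if_pos hm]
      rw [dedupF_skip _ (chl p) V (by
        intro r hr
        rcases List.mem_map.mp hr with ⟨q, hq, rfl⟩
        exact h1 p.1 hm q hq)]
      exact ih W V h1 h2 (fun q hq => h3 q (List.mem_cons_of_mem _ hq))
    · rw [if_neg hm]
      simp only [List.flatMap_cons]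
      rw [dedupF_append _ (chl p) V, dedupF_append _ (chl p) V]
      congr 1
      apply ih (W ++ [p.1]) (V ++ (dedupF V (chl p)).map Prod.fst)
      · intro a ha r hr
        rcases List.mem_append.mp ha with haW | hap
        · exact List.mem_append_left _ (h1 a haW r hr)
        · have : a = p.1 := by simpa using hap
          subst this
          have : r.1 ∈ (chl p).map Prod.fst := by
            rw [keys_chl]; exact List.mem_map_of_mem hr
          exact keys_dedupF_complete (chl p) V r.1 this
      · intro a ha
        rcases List.mem_append.mp ha with haW | hap
        · exact List.mem_append_left _ (h2 haW)
        · have : a = p.1 := by simpa using hap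
          subst this
          exact List.mem_append_left _ (h3 p (List.mem_cons_self ..))
      · intro q hq
        exact List.mem_append_left _ (h3 q (List.mem_cons_of_mem _ hq))

-- one level of B's inner fold over a flattened child list = dedupF
theorem fold_level (g : List (Int × String)) :
    ∀ (vis : List Int) (acc : List (Int × String)),
      g.foldl
        (fun (acc2 : PySem.Set Int × List (Int × String)) q =>
          if PySem.Set.contains acc2.1 q.1 then acc2
          else (PySem.Set.add acc2.1 q.1, acc2.2 ++ [q]))
        (vis, acc) =
      (vis ++ (dedupF vis g).map Prod.fst, acc ++ dedupF vis g) := by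
  induction g with
  | nil => intro vis acc; simp [dedupF]
  | cons q rest ih =>
    intro vis acc
    simp only [List.foldl_cons, dedupF]
    by_cases hm : q.1 ∈ vis
    · have hc : PySem.Set.contains vis q.1 = true := by simp [PySem.Set.contains, hm]
      rw [if_pos hm]
      simp only [hc, if_pos]
      exact ih vis acc
    · have hc : PySem.Set.contains vis q.1 = false := by simp [PySem.Set.contains, hm]
      rw [if_neg hm]
      simp only [hc, Bool.false_eq_true, if_false, set_add_of_not_mem vis q.1 hm]
      rw [ih (vis ++ [q.1]) (acc ++ [q])]
      simp [List.append_assoc]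

-- B's nested fold over the frontier = the same fold over the flattened children
theorem fold_nested (fr : List (Int × String)) :
    ∀ (init : PySem.Set Int × List (Int × String)),
      fr.foldl
        (fun (acc : PySem.Set Int × List (Int × String)) p =>
          (neighbors p.1).foldl
            (fun (acc2 : PySem.Set Int × List (Int × String)) q =>
              if PySem.Set.contains acc2.1 q.1 then acc2
              else (PySem.Set.add acc2.1 q.1, acc2.2 ++ [(q.1, p.2 ++ q.2)]))
            acc)
        init =
      (fr.flatMap chl).foldl
        (fun (acc2 : PySem.Set Int × List (Int × String)) q =>
          if PySem.Set.contains acc2.1 q.1 then acc2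
          else (PySem.Set.add acc2.1 q.1, acc2.2 ++ [q]))
        init := by
  induction fr with
  | nil => intro init; rfl
  | cons p rest ih =>
    intro init
    simp only [List.foldl_cons, List.flatMap_cons, List.foldl_append]
    rw [← ih, chl, List.foldl_map]

theorem levelLoop_eq_levelSearch (t : Int) :
    ∀ (m : Nat) (fr : List (Int × String)) (W : List Int), t ∉ W →
      (∀ a ∈ W, ∀ r ∈ neighbors a, r.1 ∈ W ++ fr.map Prod.fst) →
      levelLoop m t (W ++ (dedupF W fr).map Prod.fst) (dedupF W fr) = levelSearch t m fr := by
  intro m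
  induction m with
  | zero => intro fr W _ _; rfl
  | succ n ih =>
    intro fr W hT h1
    have hfind := find?_dedupF t fr W hT
    simp only [levelLoop, levelSearch, hfind]
    cases hf : fr.find? (fun p => p.1 == t) with
    | some p => rfl
    | none =>
      simp only []
      set fr' := dedupF W fr with hfr'
      set vis := W ++ fr'.map Prod.fst with hvis
      have hkeysfr : ∀ p ∈ fr, p.1 ∈ vis := by
        intro p hp
        exact keys_dedupF_complete fr W p.1 (List.mem_map_of_mem hp)
      have hWsub : W ⊆ vis := List.subset_append_left ..
      have hchW : ∀ a ∈ W, ∀ r ∈ neighbors a, r.1 ∈ vis := by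
        intro a ha r hr
        rcases List.mem_append.mp (h1 a ha r hr) with h | h
        · exact hWsub h
        · rcases List.mem_map.mp h with ⟨p, hp, hpeq⟩
          rw [← hpeq]; exact hkeysfr p hp
      rw [fold_nested, fold_level]
      simp only [List.nil_append]
      rw [prune_flatMap fr W vis hchW hWsub hkeysfr]
      apply ih (fr.flatMap chl) vis
      · intro hmem
        rcases List.mem_append.mp hmem with h | h
        · exact hT h
        · rcases List.mem_map.mp h with ⟨p, hp, hp1⟩
          have hpfr := (mem_dedupF fr W p hp).1
          have := List.find?_eq_none.mp hf p hpfr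
          simp [hp1] at this
      · intro a ha r hr
        rcases List.mem_append.mp ha with haW | hafr'
        · exact List.mem_append_left _ (hchW a haW r hr)
        · rcases List.mem_map.mp hafr' with ⟨p, hp, rfl⟩
          have hpfr := (mem_dedupF fr W p hp).1
          apply List.mem_append_right
          apply List.mem_map.mpr
          refine ⟨(r.1, p.2 ++ r.2), List.mem_flatMap.mpr ⟨p, hpfr, ?_⟩, rfl⟩
          simp only [chl, List.mem_map]
          exact ⟨(r.1, r.2), hr, rfl⟩

-- ---- reachability: a hit occurs within 256 levels (via the all-'i' path) ----
theorem mod256_emod (a : Int) : PySem.Int.mod a 256 = a % 256 :=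
  PySem.Int.mod_eq_emod_of_pos (by norm_num)

theorem step_mem (fr : List (Int × String)) (a : Int) (out : String) (h : (a, out) ∈ fr) :
    (PySem.Int.mod (a + 1) 256, out ++ "i") ∈ fr.flatMap chl := by
  apply List.mem_flatMap.mpr ⟨(a, out), h, ?_⟩
  simp [chl, neighbors]

theorem reach (t : Int) :
    ∀ (k m : Nat) (fr : List (Int × String)) (a : Int) (out : String),
      (a, out) ∈ fr → PySem.Int.mod a 256 = a →
      PySem.Int.mod (a + (k : Int)) 256 = t → k < m → hitWithin t m fr := by
  intro k
  induction k with
  | zero =>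
    intro m fr a out hmem ha ht hm
    obtain ⟨m', rfl⟩ : ∃ m', m = m' + 1 := ⟨m - 1, by omega⟩
    left
    refine ⟨(a, out), hmem, ?_⟩
    have h' : PySem.Int.mod a 256 = t := by simpa using ht
    rw [ha] at h'
    exact h'
  | succ k ih =>
    intro m fr a out hmem ha ht hm
    obtain ⟨m', rfl⟩ : ∃ m', m = m' + 1 := ⟨m - 1, by omega⟩
    right
    apply ih m' (fr.flatMap chl) (PySem.Int.mod (a + 1) 256) (out ++ "i") (step_mem fr a out hmem)
    · rw [mod256_emod, mod256_emod]; omega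
    · rw [mod256_emod] at ht ⊢
      rw [mod256_emod]
      push_cast at ht ⊢
      omega
    · omega

theorem hit_start (start target : Int) :
    hitWithin (PySem.Int.mod target 256) 257 [(PySem.Int.mod start 256, "")] := by
  set s0 := PySem.Int.mod start 256 with hs0
  set t0 := PySem.Int.mod target 256 with ht0
  have hs : PySem.Int.mod s0 256 = s0 := by
    rw [hs0, mod256_emod, mod256_emod]; omega
  set k : Nat := ((t0 - s0) % 256).toNat with hk
  have hkcast : (k : Int) = (t0 - s0) % 256 := by
    rw [hk]; rw [Int.toNat_of_nonneg (Int.emod_nonneg _ (by norm_num))]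
  have hklt : k < 257 := by
    have : (t0 - s0) % 256 < 256 := Int.emod_lt_of_pos _ (by norm_num)
    omega
  apply reach t0 k 257 _ s0 "" (List.mem_singleton.mpr rfl) hs _ hklt
  rw [mod256_emod, hkcast, hs0, ht0, mod256_emod, mod256_emod]
  omega

-- ---- assembling ----
theorem bfs_eq_levelSearch (start target : Int) :
    bfs start target =
      levelSearch (PySem.Int.mod target 256) 257 [(PySem.Int.mod start 256, "")] := by
  set s0 := PySem.Int.mod start 256
  set t0 := PySem.Int.mod target 256
  have hmap : [(s0, t0, "")] = [((s0 : Int), ("" : String))].map (fun p => (p.1, t0, p.2)) := rfl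
  rw [bfs, hmap, bfsLoop_eq_pairLoop t0 _ [(s0, "")]]
  have hle : fuelFor 257 ≤ 3 ^ 257 := le_of_lt (fuelFor_lt 257)
  have hfuel : 3 ^ 257 = [((s0 : Int), ("" : String))].length * fuelFor 257 + (3 ^ 257 - fuelFor 257) := by
    simp only [List.length_singleton, one_mul]
    omega
  rw [hfuel]
  exact pairLoop_eq_levelSearch t0 257 [(s0, "")] (hit_start start target) _

theorem bfs_alt_eq_levelSearch (start target : Int) :
    bfs_alt start target =
      levelSearch (PySem.Int.mod target 256) 257 [(PySem.Int.mod start 256, "")] := by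
  set s0 := PySem.Int.mod start 256
  set t0 := PySem.Int.mod target 256
  have hded : dedupF [] [((s0 : Int), ("" : String))] = [(s0, "")] := by simp [dedupF]
  have hvis : PySem.Set.add PySem.Set.empty s0
      = ([] : List Int) ++ (dedupF [] [((s0 : Int), ("" : String))]).map Prod.fst := by
    rw [hded]
    simp [PySem.Set.add, PySem.Set.contains, PySem.Set.empty]
  rw [bfs_alt, hvis, show [((s0 : Int), ("" : String))] = dedupF [] [(s0, "")] from hded.symm]
  exact levelLoop_eq_levelSearch t0 257 [(s0, "")] [] (by simp) (by simp)

-- ===== VERDICT (by name: the statement is the Claim_ definition above) =====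
theorem bfs_spec : Claim_equal_bfs := by
  intro start target _
  unfold Spec_bfs
  rw [bfs_eq_levelSearch, bfs_alt_eq_levelSearch]
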